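-- pv_equiv track=rewrite | github.com/IDEA-CCNL/Fengshenbang-LM | fengshen/examples/pretrain_uie/data_processing/universal_ie/task_format/ChineseNER.py | bioul_tags_to_spans
-- ===== SOURCE A (Python) =====
-- from typing import List, Optional, Tuple, Set
--
-- def bioul_tags_to_spans(
--     tag_sequence: List[str], classes_to_ignore: List[str] = None
-- ) -> List[Tuple[str, Tuple[int, int]]]:
--     """
--     Given a sequence corresponding to BIOUL tags, extracts spans.
--     Spans are inclusive and can be of zero length, representing a single word span.
--     Ill-formed spans are not allowed and will raise `InvalidTagSequence`.
--     This function works properly when the spans are unlabeled (i.e., your labels are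
--     simply "B", "I", "O", "U", and "L").
--     # Parameters
--     tag_sequence : `List[str]`, required.
--         The tag sequence encoded in BIOUL, e.g. ["B-PER", "L-PER", "O"].
--     classes_to_ignore : `List[str]`, optional (default = `None`).
--         A list of string class labels `excluding` the bio tag
--         which should be ignored when extracting spans.
--     # Returns
--     spans : `List[TypedStringSpan]`
--         The typed, extracted spans from the sequence, in the format (label, (span_start, span_end)).
--     """
--     spans = []
--     classes_to_ignore = classes_to_ignore or []
--     index = 0
--     while index < len(tag_sequence):
--         label = tag_sequence[index]
--         if label[0] == "U":
--             spans.append((label.partition("-")[2], (index, index)))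
--         elif label[0] == "B":
--             start = index
--             while label[0] != "L":
--                 index += 1
--                 if index >= len(tag_sequence):
--                     raise RuntimeError('Invalid tag sequence %s' % tag_sequence)
--                     # raise InvalidTagSequence(tag_sequence)
--                 label = tag_sequence[index]
--                 if not (label[0] == "I" or label[0] == "L"):
--                     raise RuntimeError('Invalid tag sequence %s' % tag_sequence)
--                     # raise InvalidTagSequence(tag_sequence)
--             spans.append((label.partition("-")[2], (start, index)))
--         else:
--             if label != "O":
--                 raise RuntimeError('Invalid tag sequence %s' % tag_sequence)
--                 # raise InvalidTagSequence(tag_sequence)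
--         index += 1
--     return [span for span in spans if span[0] not in classes_to_ignore]
-- ===== SOURCE B (Python) =====
-- def bioul_tags_to_spans(tag_sequence, classes_to_ignore=None):
--     classes_to_ignore = classes_to_ignore or []
--     spans = []
--     in_span = False
--     start = 0
--     for i, label in enumerate(tag_sequence):
--         if not in_span:
--             if label[0] == "U":
--                 spans.append((label.partition("-")[2], (i, i)))
--             elif label[0] == "B":
--                 in_span = True
--                 start = i
--             elif label != "O":
--                 raise RuntimeError('Invalid tag sequence %s' % tag_sequence)
--         else:
--             if label[0] == "L":
--                 spans.append((label.partition("-")[2], (start, i)))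
--                 in_span = False
--             elif label[0] != "I":
--                 raise RuntimeError('Invalid tag sequence %s' % tag_sequence)
--     if in_span:
--         raise RuntimeError('Invalid tag sequence %s' % tag_sequence)
--     return [span for span in spans if span[0] not in classes_to_ignore]
-- ===== Notes on version B (the rewrite author's own statement) =====
-- stated objective: simpler
-- what changed: Replaced A's nested while loops with manual index arithmetic by a single flat for-loop over enumerate with an explicit in_span/start state machine.
import Mathlib
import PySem

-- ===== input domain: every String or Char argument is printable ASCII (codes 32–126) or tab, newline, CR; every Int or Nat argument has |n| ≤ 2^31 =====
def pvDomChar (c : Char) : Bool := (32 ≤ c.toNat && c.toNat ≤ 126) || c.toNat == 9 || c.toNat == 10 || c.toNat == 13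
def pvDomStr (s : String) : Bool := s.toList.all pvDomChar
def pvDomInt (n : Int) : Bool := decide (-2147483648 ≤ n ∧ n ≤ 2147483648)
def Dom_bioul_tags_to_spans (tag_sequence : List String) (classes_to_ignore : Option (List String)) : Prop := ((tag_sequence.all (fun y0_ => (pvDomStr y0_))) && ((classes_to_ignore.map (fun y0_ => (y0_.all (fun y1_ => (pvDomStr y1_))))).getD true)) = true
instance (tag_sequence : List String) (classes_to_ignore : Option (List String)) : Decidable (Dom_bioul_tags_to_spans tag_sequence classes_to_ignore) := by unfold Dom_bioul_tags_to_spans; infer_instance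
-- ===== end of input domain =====

-- B replaces A's nested while loops (inner loop scanning for "L" with manual index
-- arithmetic) by one flat loop over the tags with an explicit in_span/start state; objective: simpler.

-- ===== PORT A =====

-- label.partition("-")[2]: everything after the first '-', "" if no dash
def pvAfterDash : List Char → List Char
  | [] => []
  | c :: cs => if c = '-' then cs else pvAfterDash cs
def pvPart2 (s : String) : String := String.ofList (pvAfterDash s.toList)

-- A's inner `while label[0] != "L"` loop: advances index and returns (index, label) at the
-- terminating "L"; none where Python raises (bounds, non-I/L tag, empty tag).  The fuel
-- argument is only a structural-termination guard (tags.length steps always suffice).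
def pvAInner (tags : List String) : Nat → Nat → String → Option (Nat × String)
  | 0, _, _ => none
  | fuelI + 1, index, label =>
    match label.toList with
    | [] => none
    | c :: _ =>
      if c = 'L' then some (index, label)
      else if h : index + 1 < tags.length then
        let label' := tags[index + 1]
        match label'.toList with
        | [] => none
        | c' :: _ =>
          if c' = 'I' ∨ c' = 'L' then pvAInner tags fuelI (index + 1) label'
          else none
      else none

-- A's outer while loop over `index`; fuel is again only a termination guard
def pvAOuter (tags : List String) : Nat → Nat → List (String × (Int × Int)) →
    List (String × (Int × Int))
  | 0, _, spans => spans
  | fuel + 1, index, spans =>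
    if h : index < tags.length then
      let label := tags[index]
      match label.toList with
      | [] => spans
      | c :: _ =>
        if c = 'U' then
          pvAOuter tags fuel (index + 1) (spans ++ [(pvPart2 label, ((index : Int), (index : Int)))])
        else if c = 'B' then
          match pvAInner tags tags.length index label with
          | some (j, lab) =>
              pvAOuter tags fuel (j + 1) (spans ++ [(pvPart2 lab, ((index : Int), (j : Int)))])
          | none => spans
        else if label = "O" then pvAOuter tags fuel (index + 1) spans
        else spans
    else spans

def bioul_tags_to_spans (tag_sequence : List String)
    (classes_to_ignore : Option (List String)) : List (String × (Int × Int)) :=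
  (pvAOuter tag_sequence tag_sequence.length 0 []).filter
    (fun span => !((classes_to_ignore.getD []).contains span.1))

-- ===== PORT B =====

-- B's single flat loop: remaining tags, current index i, in_span flag, start of open span
def pvBLoop : List String → Nat → Bool → Int → List (String × (Int × Int)) →
    List (String × (Int × Int))
  | [], _, _, _, spans => spans
  | label :: rest, i, in_span, start, spans =>
    if in_span = false then
      match label.toList with
      | [] => spans
      | c :: _ =>
        if c = 'U' then
          pvBLoop rest (i + 1) false start (spans ++ [(pvPart2 label, ((i : Int), (i : Int)))])
        else if c = 'B' then pvBLoop rest (i + 1) true (i : Int) spans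
        else if label = "O" then pvBLoop rest (i + 1) false start spans
        else spans
    else
      match label.toList with
      | [] => spans
      | c :: _ =>
        if c = 'L' then
          pvBLoop rest (i + 1) false start (spans ++ [(pvPart2 label, (start, (i : Int)))])
        else if c = 'I' then pvBLoop rest (i + 1) true start spans
        else spans

def bioul_tags_to_spans_alt (tag_sequence : List String)
    (classes_to_ignore : Option (List String)) : List (String × (Int × Int)) :=
  (pvBLoop tag_sequence 0 false 0 []).filter
    (fun span => !((classes_to_ignore.getD []).contains span.1))

-- ===== PRECONDITION & SPEC =====

-- membership of the tag list in the well-formed-BIOUL language (a two-state grammar)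
def pvValid : Bool → List String → Bool
  | false, [] => true
  | true, [] => false
  | in_span, label :: rest =>
    match label.toList with
    | [] => false
    | c :: _ =>
      if in_span = false then
        if c = 'U' then pvValid false rest
        else if c = 'B' then pvValid true rest
        else label == "O" && pvValid false rest
      else
        if c = 'L' then pvValid false rest
        else if c = 'I' then pvValid true rest
        else false

-- Pre_ excludes exactly the ill-formed BIOUL sequences, on which A raises
-- (RuntimeError; IndexError for an empty-string tag) and returns no value; B raises there too.
def Pre_bioul_tags_to_spans (tag_sequence : List String)
    (classes_to_ignore : Option (List String)) : Prop :=
  pvValid false tag_sequence = true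

instance (tag_sequence : List String) (classes_to_ignore : Option (List String)) :
    Decidable (Pre_bioul_tags_to_spans tag_sequence classes_to_ignore) := by
  unfold Pre_bioul_tags_to_spans; infer_instance

def pvWitness_bioul_tags_to_spans : List String × Option (List String) :=
  (["B-PER", "I-PER", "L-PER", "O", "U-LOC"], some ["MISC"])

def Spec_bioul_tags_to_spans (tag_sequence : List String)
    (classes_to_ignore : Option (List String)) (out : List (String × (Int × Int))) : Prop :=
  out = bioul_tags_to_spans_alt tag_sequence classes_to_ignore

instance (tag_sequence : List String) (classes_to_ignore : Option (List String))
    (out : List (String × (Int × Int))) :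
    Decidable (Spec_bioul_tags_to_spans tag_sequence classes_to_ignore out) := by
  unfold Spec_bioul_tags_to_spans; infer_instance

-- ===== CLAIM (what is proved, stated in full; the proofs are below) =====
def Claim_equal_bioul_tags_to_spans : Prop := ∀ (tag_sequence : List String) (classes_to_ignore : Option (List String)), Dom_bioul_tags_to_spans tag_sequence classes_to_ignore → Pre_bioul_tags_to_spans tag_sequence classes_to_ignore → Spec_bioul_tags_to_spans tag_sequence classes_to_ignore (bioul_tags_to_spans tag_sequence classes_to_ignore)

-- ===== LEMMAS AND PROOFS =====

-- From index idx (with enough fuel) A's outer loop agrees with pvBLoop on the remaining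
-- tags out of a span, and, inside a span, A's inner scan followed by the outer loop agrees
-- with pvBLoop in the in_span state; one strong induction on the remaining tags covers both.
theorem pvMain : ∀ (n : Nat) (rem : List String), rem.length ≤ n →
    (∀ (tags : List String) (fuel idx : Nat) (start : Int)
        (spans : List (String × (Int × Int))),
      tags.drop idx = rem → tags.length - idx ≤ fuel → pvValid false rem = true →
      pvAOuter tags fuel idx spans = pvBLoop rem idx false start spans)
    ∧ (∀ (tags : List String) (fuelI fuelA idx : Nat) (label : String) (c : Char)
        (cs : List Char) (start : Int) (spans : List (String × (Int × Int))),
      idx < tags.length →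
      tags[idx]? = some label → label.toList = c :: cs → c ≠ 'L' →
      tags.drop (idx + 1) = rem →
      tags.length - idx ≤ fuelI → tags.length - (idx + 1) ≤ fuelA →
      pvValid true rem = true →
      (match pvAInner tags fuelI idx label with
       | some (j, lab) => pvAOuter tags fuelA (j + 1) (spans ++ [(pvPart2 lab, (start, (j : Int)))])
       | none => spans) = pvBLoop rem (idx + 1) true start spans) := by
  intro n
  induction n with
  | zero =>
    intro rem hlen
    have hrem : rem = [] := List.eq_nil_of_length_eq_zero (Nat.le_zero.mp hlen)
    subst hrem
    constructor
    · intro tags fuel idx start spans hdrop hfuel _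
      have hge : tags.length ≤ idx := by
        have := congrArg List.length hdrop; simp at this; omega
      cases fuel with
      | zero => rfl
      | succ f => rw [pvAOuter]; rw [dif_neg (by omega)]; rfl
    · intro tags fuelI fuelA idx label c cs start spans _ _ _ _ _ _ _ hvalid
      simp [pvValid] at hvalid
  | succ n ih =>
    intro rem hlen
    constructor
    · intro tags fuel idx start spans hdrop hfuel hvalid
      cases rem with
      | nil =>
        have hge : tags.length ≤ idx := by
          have := congrArg List.length hdrop; simp at this; omega
        cases fuel with
        | zero => rfl
        | succ f => rw [pvAOuter]; rw [dif_neg (by omega)]; rfl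
      | cons label rest =>
        have hlt : idx < tags.length := by
          by_contra hcon; push_neg at hcon
          rw [List.drop_eq_nil_of_le hcon] at hdrop; simp at hdrop
        have hcons := (List.drop_eq_getElem_cons hlt).symm.trans hdrop
        injection hcons with hget hrest
        have hrl : rest.length ≤ n := by simp at hlen; omega
        cases fuel with
        | zero => omega
        | succ f =>
        rw [pvAOuter]; rw [dif_pos hlt]
        rcases hc : label.toList with _ | ⟨c, cs⟩
        · simp [pvValid, hc] at hvalid
        · simp only [hget, hc]
          rw [pvBLoop]
          simp only [hc, if_true]
          by_cases hU : c = 'U'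
          · subst hU
            rw [if_pos rfl]
            have hvr : pvValid false rest = true := by
              simpa [pvValid, hc] using hvalid
            exact (ih rest hrl).1 tags f (idx + 1) start _ hrest (by omega) hvr
          · rw [if_neg hU, if_neg hU]
            by_cases hB : c = 'B'
            · subst hB
              rw [if_pos rfl]
              have hvr : pvValid true rest = true := by
                simpa [pvValid, hc, hU] using hvalid
              exact (ih rest hrl).2 tags tags.length f idx label 'B' cs ((idx : Nat) : Int)
                spans hlt (by rw [List.getElem?_eq_getElem hlt, hget]) hc (by decide)
                hrest (by omega) (by omega) hvr
            · have hO : label = "O" ∧ pvValid false rest = true := by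
                have := hvalid
                simp [pvValid, hc, hU, hB] at this
                exact ⟨this.1, this.2⟩
              rw [if_neg hB, if_neg hB, if_pos hO.1, if_pos hO.1]
              exact (ih rest hrl).1 tags f (idx + 1) start spans hrest (by omega) hO.2
    · intro tags fuelI fuelA idx label c cs start spans hlt hgets hc hcL hdrop hfI hfA hvalid
      cases rem with
      | nil => simp [pvValid] at hvalid
      | cons t rest =>
        have hrl : rest.length ≤ n := by simp at hlen; omega
        have hlt2 : idx + 1 < tags.length := by
          have := congrArg List.length hdrop; simp at this; omega
        have hcons := (List.drop_eq_getElem_cons hlt2).symm.trans hdrop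
        injection hcons with hget2 hrest2
        cases fuelI with
        | zero => omega
        | succ fI =>
        rw [pvAInner]
        simp only [hc]
        rw [if_neg hcL, dif_pos hlt2]
        simp only [hget2]
        rcases hct : t.toList with _ | ⟨c', cs'⟩
        · simp [pvValid, hct] at hvalid
        · rw [pvBLoop]
          simp only [hct]
          by_cases hL : c' = 'L'
          · subst hL
            cases fI with
            | zero => omega
            | succ fI2 =>
            rw [pvAInner]
            simp only [hct]
            have hvr : pvValid false rest = true := by
              simpa [pvValid, hct] using hvalid
            simpa using (ih rest hrl).1 tags fuelA (idx + 1 + 1) start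
              (spans ++ [(pvPart2 t, (start, ((idx + 1 : Nat) : Int)))]) hrest2 (by omega) hvr
          · by_cases hI : c' = 'I'
            · subst hI
              have hvr : pvValid true rest = true := by
                simpa [pvValid, hct, hL] using hvalid
              have hq := (ih rest hrl).2 tags fI fuelA (idx + 1) t 'I' cs' start spans hlt2
                (by rw [List.getElem?_eq_getElem hlt2, hget2]) hct (by decide) hrest2
                (by omega) (by omega) hvr
              simpa using hq
            · simp [pvValid, hct, hL, hI] at hvalid

-- ===== VERDICT (by name: the statement is the Claim_ definition above) =====
theorem bioul_tags_to_spans_spec : Claim_equal_bioul_tags_to_spans := by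
  intro tags cls _ hpre
  unfold Spec_bioul_tags_to_spans bioul_tags_to_spans bioul_tags_to_spans_alt
  have h := (pvMain tags.length tags le_rfl).1 tags tags.length 0 0 [] (by simp)
    (by omega) hpre
  rw [h]
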